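-- pv_equiv track=rewrite | github.com/tsingqingyun/lingbot | check_fram.py | find_image_keys
-- ===== SOURCE A (Python) =====
-- def find_image_keys(batch):
--     candidates = []
--     for k in batch.keys():
--         lk = k.lower()
--         if any(t in lk for t in [
--             "image", "images", "pixel", "rgb", "frame", "obs"
--         ]):
--             candidates.append(k)
--     return candidates
-- ===== SOURCE B (Python) =====
-- TOKENS = ("image", "pixel", "rgb", "frame", "obs")
--
--
-- def _hit(s):
--     # naive multi-pattern scan: one left-to-right pass over positions of s
--     for i in range(len(s)):
--         for t in TOKENS:
--             if s.startswith(t, i):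
--                 return True
--     return False
--
--
-- def find_image_keys(batch):
--     return [k for k in batch if _hit(k.lower())]
-- ===== Notes on version B (the rewrite author's own statement) =====
-- stated objective: alternative
-- what changed: B replaces A's per-token substring membership tests (six 'in' scans per key, with the redundant token 'images' dropped since it implies 'image') by a single left-to-right positional scan of the lowered key that tries each remaining token as a prefix at every position; the list comprehension replaces the append loop.
import Mathlib
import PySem

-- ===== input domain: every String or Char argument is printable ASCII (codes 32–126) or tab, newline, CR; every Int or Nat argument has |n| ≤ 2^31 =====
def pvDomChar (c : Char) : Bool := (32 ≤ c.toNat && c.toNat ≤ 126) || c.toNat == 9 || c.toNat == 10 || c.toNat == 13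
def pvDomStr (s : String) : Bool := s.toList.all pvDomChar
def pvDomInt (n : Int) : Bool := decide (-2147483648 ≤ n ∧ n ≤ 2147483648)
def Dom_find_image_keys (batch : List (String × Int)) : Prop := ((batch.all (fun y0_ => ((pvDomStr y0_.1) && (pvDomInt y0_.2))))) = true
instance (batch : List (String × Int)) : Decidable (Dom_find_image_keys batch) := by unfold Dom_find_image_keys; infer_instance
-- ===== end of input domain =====

-- B replaces the per-token substring tests by one positional scan of the lowered key
-- (at each position, try the five necessary patterns as prefixes); objective: alternative.

-- ===== PORT A =====
-- A: loop over keys, append k when any of the six tokens occurs in k.lower()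
def find_image_keys (batch : List (String × Int)) : List String :=
  batch.foldl (fun candidates kv =>
    let lk := PySem.Str.lower kv.1
    if (["image", "images", "pixel", "rgb", "frame", "obs"]).any
        (fun t => PySem.Str.isIn t lk)
    then candidates ++ [kv.1] else candidates) []

-- ===== PORT B =====
def altTokens : List String := ["image", "pixel", "rgb", "frame", "obs"]

-- B's _hit: scan positions left to right, at each position try each token as a prefix
def hitFrom (cs : List Char) : Bool :=
  match cs with
  | [] => false
  | c :: rest => altTokens.any (fun t => t.toList.isPrefixOf (c :: rest)) || hitFrom rest

def find_image_keys_alt (batch : List (String × Int)) : List String :=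
  (batch.map (fun kv => kv.1)).filter (fun k => hitFrom (PySem.Str.lower k).toList)

-- ===== PRECONDITION & SPEC =====
def Spec_find_image_keys (batch : List (String × Int)) (out : List String) : Prop := out = find_image_keys_alt batch
instance (batch : List (String × Int)) (out : List String) : Decidable (Spec_find_image_keys batch out) := by unfold Spec_find_image_keys; infer_instance

-- ===== CLAIM (what is proved, stated in full; the proofs are below) =====
def Claim_equal_find_image_keys : Prop := ∀ (batch : List (String × Int)), Dom_find_image_keys batch → Spec_find_image_keys batch (find_image_keys batch)

-- ===== LEMMAS AND PROOFS =====

theorem hitFrom_iff (cs : List Char) :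
    hitFrom cs = true ↔ ∃ t ∈ altTokens, t.toList <:+: cs := by
  induction cs with
  | nil =>
      simp only [hitFrom, List.infix_nil]
      constructor
      · intro h; exact absurd h (by decide)
      · rintro ⟨t, ht, h⟩
        exfalso
        revert h
        fin_cases ht <;> decide
  | cons c rest ih =>
      simp only [hitFrom, Bool.or_eq_true, List.any_eq_true, List.isPrefixOf_iff_prefix, ih]
      constructor
      · rintro (⟨t, ht, hp⟩ | ⟨t, ht, hi⟩)
        · exact ⟨t, ht, hp.isInfix⟩
        · exact ⟨t, ht, List.infix_cons hi⟩
      · rintro ⟨t, ht, hi⟩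
        rcases (List.infix_cons_iff).mp hi with hp | hi'
        · exact Or.inl ⟨t, ht, hp⟩
        · exact Or.inr ⟨t, ht, hi'⟩

theorem key_eq (s : String) :
    (["image", "images", "pixel", "rgb", "frame", "obs"]).any
        (fun t => PySem.Str.isIn t s) = hitFrom s.toList := by
  rw [Bool.eq_iff_iff]
  simp only [List.any_eq_true, PySem.Str.isIn_iff_infix, hitFrom_iff]
  constructor
  · rintro ⟨t, ht, hi⟩
    simp only [List.mem_cons, List.not_mem_nil, or_false] at ht
    rcases ht with rfl | rfl | rfl | rfl | rfl | rfl
    · exact ⟨"image", by decide, hi⟩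
    · exact ⟨"image", by decide,
        (show ("image".toList : List Char) <:+: "images".toList by decide).trans hi⟩
    · exact ⟨"pixel", by decide, hi⟩
    · exact ⟨"rgb", by decide, hi⟩
    · exact ⟨"frame", by decide, hi⟩
    · exact ⟨"obs", by decide, hi⟩
  · rintro ⟨t, ht, hi⟩
    fin_cases ht
    · exact ⟨"image", by decide, hi⟩
    · exact ⟨"pixel", by decide, hi⟩
    · exact ⟨"rgb", by decide, hi⟩
    · exact ⟨"frame", by decide, hi⟩
    · exact ⟨"obs", by decide, hi⟩

theorem fold_filter (batch : List (String × Int)) (acc : List String) :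
    batch.foldl (fun candidates kv =>
      let lk := PySem.Str.lower kv.1
      if (["image", "images", "pixel", "rgb", "frame", "obs"]).any
          (fun t => PySem.Str.isIn t lk)
      then candidates ++ [kv.1] else candidates) acc
    = acc ++ (batch.map (fun kv => kv.1)).filter
        (fun k => hitFrom (PySem.Str.lower k).toList) := by
  induction batch generalizing acc with
  | nil => simp
  | cons kv rest ih =>
      simp only [List.foldl_cons, List.map_cons, List.filter_cons]
      rw [key_eq]
      by_cases h : hitFrom (PySem.Str.lower kv.1).toList = true
      · rw [if_pos h, if_pos h, ih]
        simp
      · rw [if_neg h, if_neg h, ih]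

-- ===== VERDICT (by name: the statement is the Claim_ definition above) =====
theorem find_image_keys_spec : Claim_equal_find_image_keys := by
  intro batch _
  unfold Spec_find_image_keys find_image_keys find_image_keys_alt
  simpa using fold_filter batch []
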